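-- pv_equiv track=rewrite | github.com/akgoldberg/smooth_lottery | merit_baselines/misc/stackelberg_model.py | generate_spearmans_footrule_permutations
-- ===== SOURCE A (Python) =====
-- import itertools
--
-- def spearmans_footrule_distance(perm, identity):
--     """Compute Spearman's Footrule distance between perm and identity."""
--     return sum(abs(i - perm[i]) for i in identity)
--
-- def generate_spearmans_footrule_permutations(n, D, distance_dict=None):
--     if distance_dict is not None:
--         perms = [perm for dist, perm in distance_dict if dist <= D]
--         return perms
--
--     """Generate all permutations of {1, ..., n} within Spearman's Footrule distance D."""
--     identity = list(range(n))
--     perms = []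
--
--     for perm in itertools.permutations(identity):
--         if spearmans_footrule_distance(perm, identity) <= D:
--             perms.append(perm)
--     return perms
-- ===== SOURCE B (Python) =====
-- def generate_spearmans_footrule_permutations(n, D, distance_dict=None):
--     if distance_dict is not None:
--         return [perm for dist, perm in distance_dict if dist <= D]
--
--     # DFS assigning positions left to right in increasing value order (= lexicographic
--     # output order), carrying the partial footrule distance and pruning any branch
--     # whose partial distance already exceeds D (the remaining terms are nonnegative).
--     def dfs(fuel, remaining, pos, dist):
--         if dist > D:
--             return []
--         if fuel == 0:
--             return [()]
--         out = []
--         for idx in range(len(remaining)):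
--             v = remaining[idx]
--             for tail in dfs(fuel - 1, remaining[:idx] + remaining[idx + 1:], pos + 1, dist + abs(pos - v)):
--                 out.append((v,) + tail)
--         return out
--
--     remaining = list(range(n))
--     return dfs(len(remaining), remaining, 0, 0)
-- ===== Notes on version B (the rewrite author's own statement) =====
-- stated objective: alternative
-- what changed: Replaces A's enumerate-all-n!-permutations-then-filter with a DFS that assigns positions left to right, carrying the partial footrule distance and pruning any branch whose partial distance already exceeds D, emitting the same tuples in the same lexicographic order.
import Mathlib
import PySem

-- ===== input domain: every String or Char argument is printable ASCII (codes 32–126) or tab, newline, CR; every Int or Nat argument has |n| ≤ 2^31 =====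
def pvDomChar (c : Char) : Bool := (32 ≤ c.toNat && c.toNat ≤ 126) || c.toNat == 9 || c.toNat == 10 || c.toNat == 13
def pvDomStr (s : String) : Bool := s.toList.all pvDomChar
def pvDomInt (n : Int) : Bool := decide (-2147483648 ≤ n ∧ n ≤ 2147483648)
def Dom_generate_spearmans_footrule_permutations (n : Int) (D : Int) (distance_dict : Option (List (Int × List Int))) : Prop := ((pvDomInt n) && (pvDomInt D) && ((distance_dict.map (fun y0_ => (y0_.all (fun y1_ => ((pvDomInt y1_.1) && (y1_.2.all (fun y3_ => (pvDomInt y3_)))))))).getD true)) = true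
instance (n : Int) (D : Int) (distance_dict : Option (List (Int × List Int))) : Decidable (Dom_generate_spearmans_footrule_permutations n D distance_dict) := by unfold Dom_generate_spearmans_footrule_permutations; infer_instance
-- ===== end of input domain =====

-- B replaces A's "enumerate all n! permutations, then filter by footrule distance" with a
-- DFS that assigns positions left to right, carries the partial distance and prunes any
-- branch whose partial distance already exceeds D; same values, same lexicographic order.

-- ===== PORT A =====
-- sum(abs(i - perm[i]) for i in identity); perm[i] is always in range on the calls A makes
def pvSfd (perm : List Int) (identity : List Int) : Int :=
  (identity.map (fun i => |i - PySem.List.pyGetD perm i 0|)).sum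

def generate_spearmans_footrule_permutations (n : Int) (D : Int) (distance_dict : Option (List (Int × List Int))) : List (List Int) :=
  match distance_dict with
  | some d => d.foldl (fun acc x => if x.1 ≤ D then acc ++ [x.2] else acc) []
  | none =>
    let identity := PySem.List.pyRange 0 n 1
    (PySem.List.permutations identity identity.length).foldl
      (fun acc perm => if pvSfd perm identity ≤ D then acc ++ [perm] else acc) []

-- ===== PORT B =====
-- dfs(fuel, remaining, pos, dist) from Source B: prune when dist > D, else branch on each
-- still-unused value (by index), accumulating |pos - v| into the running distance
def pvDfs (D : Int) : Nat → List Int → Int → Int → List (List Int)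
  | 0, _, _, dist => if D < dist then [] else [[]]
  | Nat.succ r, remaining, pos, dist =>
    if D < dist then []
    else
      (List.range remaining.length).flatMap (fun idx =>
        match remaining[idx]? with
        | none => []
        | some v => (pvDfs D r (remaining.eraseIdx idx) (pos + 1) (dist + |pos - v|)).map (v :: ·))

def generate_spearmans_footrule_permutations_alt (n : Int) (D : Int) (distance_dict : Option (List (Int × List Int))) : List (List Int) :=
  match distance_dict with
  | some d => (d.filter (fun x => x.1 ≤ D)).map Prod.snd
  | none =>
    let remaining := PySem.List.pyRange 0 n 1
    pvDfs D remaining.length remaining 0 0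

-- ===== PRECONDITION & SPEC =====
def Spec_generate_spearmans_footrule_permutations (n : Int) (D : Int) (distance_dict : Option (List (Int × List Int))) (out : List (List Int)) : Prop := out = generate_spearmans_footrule_permutations_alt n D distance_dict
instance (n : Int) (D : Int) (distance_dict : Option (List (Int × List Int))) (out : List (List Int)) : Decidable (Spec_generate_spearmans_footrule_permutations n D distance_dict out) := by unfold Spec_generate_spearmans_footrule_permutations; infer_instance

-- ===== CLAIM (what is proved, stated in full; the proofs are below) =====
def Claim_equal_generate_spearmans_footrule_permutations : Prop := ∀ (n : Int) (D : Int) (distance_dict : Option (List (Int × List Int))), Dom_generate_spearmans_footrule_permutations n D distance_dict → Spec_generate_spearmans_footrule_permutations n D distance_dict (generate_spearmans_footrule_permutations n D distance_dict)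

-- ===== LEMMAS AND PROOFS =====

-- footrule distance of p when positions start at pos, computed positionally (B's running sum)
def pvCost : Int → List Int → Int
  | _, [] => 0
  | pos, v :: t => |pos - v| + pvCost (pos + 1) t

theorem pvCost_nonneg : ∀ (p : List Int) (pos : Int), 0 ≤ pvCost pos p := by
  intro p
  induction p with
  | nil => intro pos; simp [pvCost]
  | cons v t ih =>
    intro pos
    have := ih (pos + 1)
    have := abs_nonneg (pos - v)
    simp [pvCost]; omega

-- B's pruned DFS = A's generate-then-filter, at any fuel/start/accumulated distance
theorem pvDfs_eq (D : Int) : ∀ (r : Nat) (xs : List Int) (pos dist : Int),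
    pvDfs D r xs pos dist
      = (PySem.List.permutations xs r).filter (fun p => decide (dist + pvCost pos p ≤ D)) := by
  intro r
  induction r with
  | zero =>
    intro xs pos dist
    by_cases h : D < dist
    · have : ¬ (dist + pvCost pos [] ≤ D) := by simp [pvCost]; omega
      simp [pvDfs, PySem.List.permutations, h, this]
    · have : dist + pvCost pos [] ≤ D := by simp [pvCost]; omega
      simp [pvDfs, PySem.List.permutations, h, this]
  | succ r ih =>
    intro xs pos dist
    by_cases h : D < dist
    · rw [pvDfs]
      simp only [h, if_true]
      symm
      rw [List.filter_eq_nil_iff]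
      intro p _
      have h1 := pvCost_nonneg p pos
      simp; omega
    · rw [pvDfs]
      simp only [h, if_false]
      rw [PySem.List.permutations, List.filter_flatMap]
      apply List.flatMap_congr
      intro idx _
      cases hget : xs[idx]? with
      | none => simp
      | some v =>
        simp only [List.filter_map]
        rw [ih]
        congr 1
        apply List.filter_congr
        intro p _
        simp [pvCost, Function.comp]
        constructor <;> intro <;> omega

-- A's indexed distance over the identity range = B's positional cost
theorem pvCost_eq_enum : ∀ (p : List Int) (pos : Int),
    pvCost pos p = ((PySem.List.enumerate p pos).map (fun q => |q.1 - q.2|)).sum := by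
  intro p
  induction p with
  | nil => intro pos; simp [pvCost, PySem.List.enumerate_nil]
  | cons v t ih => intro pos; simp [pvCost, PySem.List.enumerate_cons, ih]

theorem pvSfd_eq_cost (p : List Int) :
    pvSfd p (PySem.List.pyRange 0 (p.length : Int) 1) = pvCost 0 p := by
  rw [pvCost_eq_enum, PySem.List.enumerate_eq_map_pyRange (d := 0), List.map_map]
  simp [pvSfd, Function.comp_def]

theorem pyRange_self_length (n : Int) :
    PySem.List.pyRange 0 (((PySem.List.pyRange 0 n 1).length : Int)) 1 = PySem.List.pyRange 0 n 1 := by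
  rw [PySem.List.length_pyRange_one]
  rw [PySem.List.pyRange_one, PySem.List.pyRange_one]
  congr 2

-- ===== VERDICT (by name: the statement is the Claim_ definition above) =====
theorem generate_spearmans_footrule_permutations_spec : Claim_equal_generate_spearmans_footrule_permutations := by
  intro n D dd _
  unfold Spec_generate_spearmans_footrule_permutations
  cases dd with
  | some d =>
    simp only [generate_spearmans_footrule_permutations, generate_spearmans_footrule_permutations_alt]
    rw [PySem.List.foldl_append_ite]
    simp
  | none =>
    simp only [generate_spearmans_footrule_permutations, generate_spearmans_footrule_permutations_alt]
    rw [PySem.List.foldl_append_ite_eq_filter, pvDfs_eq]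
    simp only [List.nil_append]
    apply List.filter_congr
    intro p hp
    have hperm := PySem.List.perm_of_mem_permutations hp
    have hlen : p.length = (PySem.List.pyRange 0 n 1).length := hperm.length_eq
    have hs : pvSfd p (PySem.List.pyRange 0 n 1) = pvCost 0 p := by
      rw [← pyRange_self_length n, ← hlen, pvSfd_eq_cost]
    simp only [hs, zero_add]
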